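-- pv_equiv track=rewrite | github.com/bustos85/practicas_master_BigData-DataScience | lenguajes/Python/cadenas.py | poner_mayuscula
-- ===== SOURCE A (Python) =====
-- def poner_mayuscula(text, num):
--     """ Función a la que se le pasa un texto y un número, y debe capitalizar
--     todas las palabras que tengan longitud igual o mayor al número pasado.
--     Además debe devolver el acrónimo. Partimos con split el texto para
--     almacenar cada palabra, y se recorre capitalizando aquellas que tienen
--     mayor o igual número de caracteres al número pasado. Además se va
--     almacenando el primer caracter de cada palabra para obtener el acrónimo."""
--     trozos = text.split(" ")
--     dos = []
--     acronimo = []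
--
--     for item in trozos:
--         if len(item) >= int(num):
--             dos.append(item.capitalize())
--             acronimo.append(item[0:1:].capitalize())
--         else:
--             dos.append(item.lower())
--             acronimo.append(item[0:1:].lower())
--
--     return "La frase capitalizada quedaría así: " + " ".join(dos) + "\nEl acrónimo sería: " + "".join(acronimo)
-- ===== SOURCE B (Python) =====
-- def poner_mayuscula(text, num):
--     # Character-level scanner: no split(); walk the raw characters with a word
--     # buffer, flushing the transformed word at each space.
--     n = int(num)
--     words = []
--     buf = ""
--     for ch in text:
--         if ch == " ":
--             words.append(buf.capitalize() if len(buf) >= n else buf.lower())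
--             buf = ""
--         else:
--             buf += ch
--     words.append(buf.capitalize() if len(buf) >= n else buf.lower())
--     return ("La frase capitalizada quedaría así: " + " ".join(words)
--             + "\nEl acrónimo sería: " + "".join(w[:1] for w in words))
-- ===== Notes on version B (the rewrite author's own statement) =====
-- stated objective: alternative
-- what changed: B never calls split: it scans the raw characters with an explicit word-buffer state machine, flushing the transformed word at each space, and derives the acronym afterwards from the first characters of the transformed words instead of keeping a second per-word accumulator.
import Mathlib
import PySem

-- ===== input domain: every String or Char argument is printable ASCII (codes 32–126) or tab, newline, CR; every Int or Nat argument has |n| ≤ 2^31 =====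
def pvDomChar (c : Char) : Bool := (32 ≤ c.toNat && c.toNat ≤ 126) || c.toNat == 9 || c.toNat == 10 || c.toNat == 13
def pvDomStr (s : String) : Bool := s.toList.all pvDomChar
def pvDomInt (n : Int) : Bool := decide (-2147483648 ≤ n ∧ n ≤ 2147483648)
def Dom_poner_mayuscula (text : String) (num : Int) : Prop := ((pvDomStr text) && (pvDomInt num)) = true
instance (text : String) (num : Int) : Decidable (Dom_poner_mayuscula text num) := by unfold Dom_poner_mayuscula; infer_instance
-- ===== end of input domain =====

-- B replaces A's split-then-loop-over-words with a character-level scanner (explicit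
-- word-buffer state machine, no split) and derives the acronym afterwards from the
-- transformed words; same cost, different traversal (objective: alternative).

-- str.capitalize(): first char uppercased, rest lowered (exact on the ASCII domain)
def pmCapitalize (cs : List Char) : List Char :=
  match cs with
  | [] => []
  | c :: r => PySem.Chars.upperChar c :: r.map PySem.Chars.lowerChar

-- ===== PORT A =====
def poner_mayuscula (text : String) (num : Int) : String :=
  let trozos := PySem.Chars.splitOn text.toList [' ']
  let st := trozos.foldl
    (fun (st : List (List Char) × List (List Char)) item =>
      if (item.length : Int) ≥ num then
        (st.1 ++ [pmCapitalize item],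
         st.2 ++ [pmCapitalize (PySem.List.slice item (some 0) (some 1))])
      else
        (st.1 ++ [PySem.Chars.lower item],
         st.2 ++ [PySem.Chars.lower (PySem.List.slice item (some 0) (some 1))]))
    ([], [])
  String.ofList ("La frase capitalizada quedaría así: ".toList
    ++ PySem.Chars.join [' '] st.1
    ++ "\nEl acrónimo sería: ".toList
    ++ PySem.Chars.join [] st.2)

-- ===== PORT B =====
-- buf.capitalize() if len(buf) >= n else buf.lower()
def pmFlush (num : Int) (buf : List Char) : List Char :=
  if (buf.length : Int) ≥ num then pmCapitalize buf else PySem.Chars.lower buf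

def poner_mayuscula_alt (text : String) (num : Int) : String :=
  -- scan the characters with state (words so far, current word buffer)
  let st := text.toList.foldl
    (fun (st : List (List Char) × List Char) ch =>
      if ch = ' ' then (st.1 ++ [pmFlush num st.2], [])
      else (st.1, st.2 ++ [ch]))
    ([], [])
  let words := st.1 ++ [pmFlush num st.2]
  String.ofList ("La frase capitalizada quedaría así: ".toList
    ++ PySem.Chars.join [' '] words
    ++ "\nEl acrónimo sería: ".toList
    ++ PySem.Chars.join [] (words.map (fun w => PySem.List.slice w none (some 1))))

-- ===== PRECONDITION & SPEC =====
def Spec_poner_mayuscula (text : String) (num : Int) (out : String) : Prop := out = poner_mayuscula_alt text num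
instance (text : String) (num : Int) (out : String) : Decidable (Spec_poner_mayuscula text num out) := by unfold Spec_poner_mayuscula; infer_instance

-- ===== CLAIM (what is proved, stated in full; the proofs are below) =====
def Claim_equal_poner_mayuscula : Prop := ∀ (text : String) (num : Int), Dom_poner_mayuscula text num → Spec_poner_mayuscula text num (poner_mayuscula text num)

-- ===== LEMMAS AND PROOFS =====

-- reference splitter used only by the proofs
def pmGlue (p : List Char) : List (List Char) → List (List Char)
  | [] => [p]
  | w :: ws => (p ++ w) :: ws

def pmSplit : List Char → List (List Char)
  | [] => [[]]
  | c :: rest => if c = ' ' then [] :: pmSplit rest else pmGlue [c] (pmSplit rest)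

theorem pmGlue_ne_nil (p : List Char) (ws : List (List Char)) : pmGlue p ws ≠ [] := by
  cases ws <;> simp [pmGlue]

theorem pmSplit_ne_nil (l : List Char) : pmSplit l ≠ [] := by
  cases l with
  | nil => simp [pmSplit]
  | cons c rest =>
    by_cases h : c = ' ' <;> simp [pmSplit, h, pmGlue_ne_nil]

theorem pmGlue_nil (ws : List (List Char)) (h : ws ≠ []) : pmGlue [] ws = ws := by
  cases ws with
  | nil => exact absurd rfl h
  | cons w ws => simp [pmGlue]

theorem pmGlue_glue (p q : List Char) (ws : List (List Char)) :
    pmGlue p (pmGlue q ws) = pmGlue (p ++ q) ws := by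
  cases ws <;> simp [pmGlue]

-- PySem's fuel-based split, characterised against pmSplit for the separator " "
theorem pm_go (fuel : Nat) :
    ∀ (l cur : List Char) (acc : List (List Char)), l.length < fuel →
      PySem.Chars.splitOn.go [' '] fuel l cur acc
        = acc.reverse ++ pmGlue cur.reverse (pmSplit l) := by
  induction fuel with
  | zero => intro l cur acc h; omega
  | succ f ih =>
    intro l cur acc h
    cases l with
    | nil => simp [PySem.Chars.splitOn.go, pmSplit, pmGlue]
    | cons c rest =>
      by_cases hc : c = ' '
      · have hpre : [' '].isPrefixOf (c :: rest) = true := by simp [List.isPrefixOf, hc]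
        have hlen : rest.length < f := by simp at h; omega
        simp only [PySem.Chars.splitOn.go, hpre]
        rw [show List.drop [' '].length (c :: rest) = rest by simp]
        rw [ih rest [] (cur.reverse :: acc) hlen]
        simp only [pmSplit, hc, pmGlue]
        cases hps : pmSplit rest with
        | nil => exact absurd hps (pmSplit_ne_nil rest)
        | cons w ws => simp
      · have hpre : [' '].isPrefixOf (c :: rest) = false := by
          simp [List.isPrefixOf]; exact fun h' => hc h'.symm
        have hlen : rest.length < f := by simp at h; omega
        simp only [PySem.Chars.splitOn.go, hpre, Bool.false_eq_true, if_false]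
        rw [ih rest (c :: cur) acc hlen]
        simp [pmSplit, hc, pmGlue_glue]

theorem pm_splitOn_eq (l : List Char) : PySem.Chars.splitOn l [' '] = pmSplit l := by
  have := pm_go (l.length + 1) l [] [] (Nat.lt_succ_self _)
  simpa [PySem.Chars.splitOn, pmGlue_nil _ (pmSplit_ne_nil l)] using this

-- B's character scan produces exactly the flushed pmSplit words
theorem pm_scan (num : Int) :
    ∀ (cs : List Char) (ws : List (List Char)) (buf : List Char),
      (cs.foldl
        (fun (st : List (List Char) × List Char) ch =>
          if ch = ' ' then (st.1 ++ [pmFlush num st.2], [])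
          else (st.1, st.2 ++ [ch])) (ws, buf)).1
        ++ [pmFlush num (cs.foldl
              (fun (st : List (List Char) × List Char) ch =>
                if ch = ' ' then (st.1 ++ [pmFlush num st.2], [])
                else (st.1, st.2 ++ [ch])) (ws, buf)).2]
      = ws ++ (pmGlue buf (pmSplit cs)).map (pmFlush num) := by
  intro cs
  induction cs with
  | nil => intro ws buf; simp [pmSplit, pmGlue]
  | cons c rest ih =>
    intro ws buf
    by_cases hc : c = ' '
    · simp only [List.foldl, hc]
      rw [ih]
      simp only [pmSplit, pmGlue]
      cases hps : pmSplit rest with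
      | nil => exact absurd hps (pmSplit_ne_nil rest)
      | cons w ws => simp
    · simp only [List.foldl, hc, if_false]
      rw [ih]
      simp only [pmSplit, hc, if_false, pmGlue]
      cases pmSplit rest <;> simp

-- A's two-accumulator append loop is the pair of maps
theorem pm_foldl_pair {α β γ : Type} (f : α → β) (g : α → γ) :
    ∀ (l : List α) (d : List β) (a : List γ),
      l.foldl (fun st item => (st.1 ++ [f item], st.2 ++ [g item])) (d, a)
        = (d ++ l.map f, a ++ l.map g) := by
  intro l
  induction l with
  | nil => simp
  | cons x xs ih => intro d a; simp [List.foldl, ih]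

theorem pm_slice_one (w : List Char) : PySem.List.slice w none (some 1) = w.take 1 := by
  have h := PySem.List.slice_to w (b := 1) (by norm_num)
  simpa using h

theorem pm_cap_take_one (w : List Char) :
    pmCapitalize (w.take 1) = (pmCapitalize w).take 1 := by
  cases w <;> simp [pmCapitalize]

theorem pm_lower_take_one (w : List Char) :
    PySem.Chars.lower (w.take 1) = (PySem.Chars.lower w).take 1 := by
  simp [PySem.Chars.lower, List.map_take]

-- ===== VERDICT (by name: the statement is the Claim_ definition above) =====
theorem poner_mayuscula_spec : Claim_equal_poner_mayuscula := by
  intro text num _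
  unfold Spec_poner_mayuscula poner_mayuscula poner_mayuscula_alt
  have hfun : (fun (st : List (List Char) × List (List Char)) item =>
      if (item.length : Int) ≥ num then
        (st.1 ++ [pmCapitalize item],
         st.2 ++ [pmCapitalize (PySem.List.slice item (some 0) (some 1))])
      else
        (st.1 ++ [PySem.Chars.lower item],
         st.2 ++ [PySem.Chars.lower (PySem.List.slice item (some 0) (some 1))]))
    = (fun (st : List (List Char) × List (List Char)) item =>
      (st.1 ++ [pmFlush num item],
       st.2 ++ [if (item.length : Int) ≥ num then pmCapitalize (PySem.List.slice item (some 0) (some 1))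
                else PySem.Chars.lower (PySem.List.slice item (some 0) (some 1))])) := by
    funext st item; simp only [pmFlush]; split_ifs <;> rfl
  have hacr : (pmSplit text.toList).map (fun item =>
      if (item.length : Int) ≥ num then pmCapitalize (PySem.List.slice item (some 0) (some 1))
      else PySem.Chars.lower (PySem.List.slice item (some 0) (some 1)))
    = ((pmSplit text.toList).map (pmFlush num)).map (fun w => PySem.List.slice w none (some 1)) := by
    rw [List.map_map]
    refine List.map_congr_left ?_
    intro w _
    by_cases h : (w.length : Int) ≥ num <;>
      simp [h, pmFlush, pm_slice_one, pm_cap_take_one, pm_lower_take_one]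
  have hB := pm_scan num text.toList [] []
  rw [pmGlue_nil _ (pmSplit_ne_nil text.toList), List.nil_append] at hB
  simp only [hfun, pm_splitOn_eq, pm_foldl_pair, List.nil_append, hacr]
  -- align A's word list ++ trailing flush structure with B's
  have hwords := hB
  -- B's words list equals the mapped pmSplit
  rw [hwords]
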